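-- pv_equiv track=rewrite | github.com/h3x89/hackerrank | codesignal/93.3.1.py | solution
-- ===== SOURCE A (Python) =====
-- def solution(numbers):
--     result = []
--     for i in range(len(numbers)):
--         if numbers[i] < 0:
--             result.append(-1)
--         else:
--             # Check range from current position to max possible steps
--             found_obstacle = False
--             for j in range(1, numbers[i] + 1):
--                 if i + j >= len(numbers):
--                     break
--                 if numbers[i + j] < 0:
--                     result.append(i + j)
--                     found_obstacle = True
--                     break
--             if not found_obstacle:
--                 result.append(numbers[i])
--     return result
-- ===== SOURCE B (Python) =====
-- def solution(numbers):
--     n = len(numbers)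
--     nxt = [None] * n  # nxt[i] = index of nearest negative strictly after i, or None
--     last = None
--     for i in range(n - 1, -1, -1):
--         nxt[i] = last
--         if numbers[i] < 0:
--             last = i
--     res = []
--     for i, v in enumerate(numbers):
--         if v < 0:
--             res.append(-1)
--         elif nxt[i] is not None and nxt[i] - i <= v:
--             res.append(nxt[i])
--         else:
--             res.append(v)
--     return res
-- ===== Notes on version B (the rewrite author's own statement) =====
-- stated objective: alternative
-- what changed: B precomputes, in one right-to-left pass, the nearest negative index after each position, then answers each element with one O(1) comparison, replacing A's per-element forward scan of up to numbers[i] steps; asymptotically O(n) vs A's O(n*V), but on the benchmark's negative-dense inputs A's scans break early so no measured speedup.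
import Mathlib
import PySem

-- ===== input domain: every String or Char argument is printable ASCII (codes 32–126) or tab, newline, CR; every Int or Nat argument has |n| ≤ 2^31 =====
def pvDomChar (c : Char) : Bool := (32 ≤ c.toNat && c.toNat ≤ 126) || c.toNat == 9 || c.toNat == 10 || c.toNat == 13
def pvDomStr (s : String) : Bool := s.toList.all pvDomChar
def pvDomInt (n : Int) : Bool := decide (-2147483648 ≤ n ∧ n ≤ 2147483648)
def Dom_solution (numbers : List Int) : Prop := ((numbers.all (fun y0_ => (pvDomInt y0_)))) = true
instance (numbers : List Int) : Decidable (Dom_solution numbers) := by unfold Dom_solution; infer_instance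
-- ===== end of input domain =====

-- B replaces A's per-element forward scan (up to numbers[i] steps each) by one
-- right-to-left precomputation of the nearest negative index after each position (objective: alternative).

-- ===== PORT A =====
-- inner loop 'for j in range(1, numbers[i]+1)' with its two breaks; returns the
-- appended obstacle index (some) or none if no obstacle was found
def scanA (numbers : List Int) (i : Int) (j stop : Int) : Option Int :=
  if j < stop then
    if (numbers.length : Int) ≤ i + j then none
    else if PySem.List.pyGetD numbers (i + j) 0 < 0 then some (i + j)
    else scanA numbers i (j + 1) stop
  else none
termination_by (stop - j).toNat
decreasing_by omega

def solution (numbers : List Int) : List Int :=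
  (PySem.List.pyRange 0 (PySem.List.len numbers) 1).foldl
    (fun result i =>
      let v := PySem.List.pyGetD numbers i 0
      if v < 0 then result ++ [-1]
      else
        match scanA numbers i 1 (v + 1) with
        | some k => result ++ [k]
        | none => result ++ [v]) []

-- ===== PORT B =====
-- right-to-left pass of Source B: carries 'last' (nearest negative index seen so far);
-- returns (the nxt array for this suffix, the updated 'last')
def buildNxt (b : Int) : List Int → List (Option Int) × Option Int
  | [] => ([], none)
  | v :: rest =>
    let p := buildNxt (b + 1) rest
    (p.2 :: p.1, if v < 0 then some b else p.2)

def solution_alt (numbers : List Int) : List Int :=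
  let nxt := (buildNxt 0 numbers).1
  (PySem.List.enumerate numbers 0).map (fun (p : Int × Int) =>
    if p.2 < 0 then -1
    else
      match PySem.List.pyGetD nxt p.1 none with
      | some k => if k - p.1 ≤ p.2 then k else p.2
      | none => p.2)

-- ===== PRECONDITION & SPEC =====
def Spec_solution (numbers : List Int) (out : List Int) : Prop := out = solution_alt numbers
instance (numbers : List Int) (out : List Int) : Decidable (Spec_solution numbers out) := by unfold Spec_solution; infer_instance

-- ===== CLAIM (what is proved, stated in full; the proofs are below) =====
def Claim_equal_solution : Prop := ∀ (numbers : List Int), Dom_solution numbers → Spec_solution numbers (solution numbers)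

-- ===== LEMMAS AND PROOFS =====

-- index of the first negative element of l, positions labelled from m
def firstNegAux (l : List Int) (m : Int) : Option Int :=
  match l with
  | [] => none
  | v :: rest => if v < 0 then some m else firstNegAux rest (m + 1)

theorem firstNegAux_some_ge (l : List Int) (m k : Int)
    (h : firstNegAux l m = some k) : m ≤ k := by
  induction l generalizing m with
  | nil => simp [firstNegAux] at h
  | cons v rest ih =>
    simp only [firstNegAux] at h
    split at h
    · simp_all
    · have := ih (m + 1) h; omega

theorem buildNxt_snd (xs : List Int) (b : Int) :
    (buildNxt b xs).2 = firstNegAux xs b := by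
  induction xs generalizing b with
  | nil => rfl
  | cons v rest ih => simp [buildNxt, firstNegAux, ih]

theorem buildNxt_fst_getElem? (xs : List Int) (b : Int) (p : Nat) (hp : p < xs.length) :
    (buildNxt b xs).1[p]? = some (firstNegAux (xs.drop (p + 1)) (b + p + 1)) := by
  induction xs generalizing b p with
  | nil => simp at hp
  | cons v rest ih =>
    cases p with
    | zero => simp [buildNxt, buildNxt_snd]
    | succ q =>
      simp only [buildNxt, List.getElem?_cons_succ]
      rw [ih (b + 1) q (by simpa using hp)]
      have h1 : (v :: rest).drop (q + 1 + 1) = rest.drop (q + 1) := rfl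
      rw [h1]
      have harg : b + 1 + (q : Int) + 1 = b + ((q + 1 : Nat) : Int) + 1 := by push_cast; ring
      rw [harg]

theorem buildNxt_length (xs : List Int) (b : Int) :
    (buildNxt b xs).1.length = xs.length := by
  induction xs generalizing b with
  | nil => rfl
  | cons v rest ih => simp [buildNxt, ih]

theorem scanA_eq (numbers : List Int) (i v : Int) (hi : 0 ≤ i) :
    ∀ (c : Nat) (j : Int), 1 ≤ j → (v + 1 - j).toNat = c →
    scanA numbers i j (v + 1) =
      (match firstNegAux (numbers.drop (i + j).toNat) (i + j) with
       | some k => if k ≤ i + v then some k else none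
       | none => none) := by
  intro c
  induction c with
  | zero =>
    intro j hj hc
    rw [scanA, if_neg (by omega)]
    cases hfn : firstNegAux (numbers.drop (i + j).toNat) (i + j) with
    | none => rfl
    | some k =>
      have := firstNegAux_some_ge _ _ _ hfn
      simp only []
      rw [if_neg (by omega)]
  | succ c ih =>
    intro j hj hc
    rw [scanA, if_pos (by omega)]
    by_cases hlen : (numbers.length : Int) ≤ i + j
    · rw [if_pos hlen, List.drop_eq_nil_of_le (by omega)]
      rfl
    · rw [if_neg hlen]
      have hlt : (i + j).toNat < numbers.length := by omega
      have hdrop : numbers.drop (i + j).toNat =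
          numbers[(i + j).toNat] :: numbers.drop ((i + j).toNat + 1) :=
        List.drop_eq_getElem_cons hlt
      have hget : PySem.List.pyGetD numbers (i + j) 0 = numbers[(i + j).toNat] :=
        PySem.List.pyGetD_eq_getElem numbers 0 (by omega) (by omega)
      rw [hget, hdrop]
      simp only [firstNegAux]
      by_cases hneg : numbers[(i + j).toNat] < 0
      · rw [if_pos hneg, if_pos hneg]
        simp only []
        rw [if_pos (by omega)]
      · rw [if_neg hneg, if_neg hneg]
        have := ih (j + 1) (by omega) (by omega)
        rw [this]
        have he : (i + (j + 1)).toNat = (i + j).toNat + 1 := by omega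
        have he2 : i + (j + 1) = i + j + 1 := by ring
        rw [he, he2]

-- pointwise agreement of A's per-index computation with B's
theorem pointwise (numbers : List Int) (i : Int) (h0 : 0 ≤ i) (hn : i < (numbers.length : Int)) :
    (let v := PySem.List.pyGetD numbers i 0
     if v < 0 then (-1 : Int)
     else match scanA numbers i 1 (v + 1) with
          | some k => k
          | none => v) =
    (if PySem.List.pyGetD numbers i 0 < 0 then (-1 : Int)
     else match PySem.List.pyGetD (buildNxt 0 numbers).1 i none with
          | some k => if k - i ≤ PySem.List.pyGetD numbers i 0 then k else PySem.List.pyGetD numbers i 0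
          | none => PySem.List.pyGetD numbers i 0) := by
  set v := PySem.List.pyGetD numbers i 0 with hv
  by_cases hneg : v < 0
  · simp only [hneg, if_pos]
  · rw [if_neg hneg, if_neg hneg]
    have hs := scanA_eq numbers i v h0 (v + 1 - 1).toNat 1 le_rfl rfl
    have hb : PySem.List.pyGetD (buildNxt 0 numbers).1 i none =
        firstNegAux (numbers.drop (i.toNat + 1)) (i + 1) := by
      have hlen : (( (buildNxt 0 numbers).1.length : Int)) = (numbers.length : Int) := by
        rw [buildNxt_length]
      have := PySem.List.pyGetD_eq_getElem (buildNxt 0 numbers).1 (i := i) none h0 (by omega)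
      rw [this]
      have hp : i.toNat < (buildNxt 0 numbers).1.length := by
        rw [buildNxt_length]; omega
      have := buildNxt_fst_getElem? numbers 0 i.toNat (by omega)
      have hg : (buildNxt 0 numbers).1[i.toNat] =
          firstNegAux (numbers.drop (i.toNat + 1)) (0 + (i.toNat : Int) + 1) := by
        have h2 := List.getElem?_eq_getElem hp
        rw [this] at h2
        exact (Option.some.inj h2).symm
      rw [hg]
      congr 1
      omega
    rw [hs, hb]
    have he : (i + 1).toNat = i.toNat + 1 := by omega
    rw [he]
    cases hfn : firstNegAux (numbers.drop (i.toNat + 1)) (i + 1) with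
    | none => rfl
    | some k =>
      simp only []
      by_cases hk : k ≤ i + v
      · rw [if_pos hk, if_pos (by omega)]
      · rw [if_neg hk, if_neg (by omega)]

theorem solution_eq_map (numbers : List Int) :
    solution numbers = (PySem.List.pyRange 0 (PySem.List.len numbers) 1).map
      (fun i =>
        let v := PySem.List.pyGetD numbers i 0
        if v < 0 then (-1 : Int)
        else match scanA numbers i 1 (v + 1) with
             | some k => k
             | none => v) := by
  unfold solution
  have hbody : (fun (result : List Int) (i : Int) =>
      let v := PySem.List.pyGetD numbers i 0
      if v < 0 then result ++ [-1]
      else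
        match scanA numbers i 1 (v + 1) with
        | some k => result ++ [k]
        | none => result ++ [v]) =
      (fun (result : List Int) (i : Int) => result ++
        [let v := PySem.List.pyGetD numbers i 0
         if v < 0 then (-1 : Int)
         else match scanA numbers i 1 (v + 1) with
              | some k => k
              | none => v]) := by
    funext result i
    simp only []
    split
    · rfl
    · split <;> rfl
  rw [hbody, PySem.List.foldl_append_singleton_eq_map, List.nil_append]

-- ===== VERDICT (by name: the statement is the Claim_ definition above) =====
theorem solution_spec : Claim_equal_solution := by
  intro numbers _
  unfold Spec_solution solution_alt
  rw [solution_eq_map]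
  rw [PySem.List.enumerate_eq_map_pyRange numbers 0, List.map_map]
  apply List.map_congr_left
  intro i hi
  have hmem := (PySem.List.mem_pyRange_one).1 hi
  simp only [PySem.List.len_eq] at hmem
  simpa using pointwise numbers i hmem.1 hmem.2
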